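-- pv_equiv track=rewrite | github.com/annafeit/norme-azerty | kaufmanbroeckx.py | printAssignment
-- ===== SOURCE A (Python) =====
-- def name(prefix, l, j):
--     return str(prefix) + "(" + str(l) + "," + str(j) + ")"
--
-- def printAssignment(n):
--     output = []
--     for k in range(n):
--         line = ""
--         for i in range(n):
--             line += " + " + name("x", k, i)
--         output.append("\n" + line + " = 1")
--
--     for i in range(n):
--         line = ""
--         for k in range(n):
--             line += " + " + name("x", k, i)
--         output.append("\n" + line + " = 1")
--     return output
-- ===== SOURCE B (Python) =====
-- def name(prefix, l, j):
--     return str(prefix) + "(" + str(l) + "," + str(j) + ")"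
--
-- def printAssignment(n):
--     # Single sweep over the rows: emit each row equation immediately and
--     # accumulate the column terms on the fly; no second nested scan.
--     cols = [[] for _ in range(n)]
--     out = []
--     for k in range(n):
--         terms = [" + " + name("x", k, i) for i in range(n)]
--         out.append("\n" + "".join(terms) + " = 1")
--         for c, t in zip(cols, terms):
--             c.append(t)
--     return out + ["\n" + "".join(c) + " = 1" for c in cols]
-- ===== Notes on version B (the rewrite author's own statement) =====
-- stated objective: alternative
-- what changed: B makes a single left-to-right sweep over the rows, emitting each row equation as it goes and accumulating all n column sums simultaneously via elementwise concatenation (zip), so each term string is generated once and A's second nested column scan disappears.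
import Mathlib
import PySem

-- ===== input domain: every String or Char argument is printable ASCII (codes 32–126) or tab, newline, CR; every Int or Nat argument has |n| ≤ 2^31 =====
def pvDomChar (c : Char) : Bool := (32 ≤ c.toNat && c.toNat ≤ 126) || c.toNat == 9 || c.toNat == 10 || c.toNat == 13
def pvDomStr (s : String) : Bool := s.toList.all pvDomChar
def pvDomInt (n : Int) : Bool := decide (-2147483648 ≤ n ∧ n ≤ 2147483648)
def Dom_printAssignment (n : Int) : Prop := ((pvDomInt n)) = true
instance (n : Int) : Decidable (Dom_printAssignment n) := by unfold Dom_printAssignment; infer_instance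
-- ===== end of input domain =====

-- B replaces A's two separate nested scans by a single sweep over the rows that emits each
-- row equation immediately and accumulates all column sums on the fly (objective: alternative).

-- ===== PORT A =====
def pyName (pre : String) (l j : Int) : String :=
  pre ++ "(" ++ PySem.Int.toStr l ++ "," ++ PySem.Int.toStr j ++ ")"

def printAssignment (n : Int) : List String :=
  let output := (PySem.List.pyRange 0 n 1).foldl (fun output k =>
      output ++ ["\n" ++ (PySem.List.pyRange 0 n 1).foldl
        (fun line i => line ++ " + " ++ pyName "x" k i) "" ++ " = 1"]) []
  (PySem.List.pyRange 0 n 1).foldl (fun output i =>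
      output ++ ["\n" ++ (PySem.List.pyRange 0 n 1).foldl
        (fun line k => line ++ " + " ++ pyName "x" k i) "" ++ " = 1"]) output

-- ===== PORT B =====
-- single sweep: state (out, cols); per row k, emit the row line and append each term to its column list
def altStep (n : Int) (st : List String × List (List String)) (k : Int) :
    List String × List (List String) :=
  let terms := (PySem.List.pyRange 0 n 1).map (fun i => " + " ++ pyName "x" k i)
  (st.1 ++ ["\n" ++ String.join terms ++ " = 1"],
   List.zipWith (fun c t => c ++ [t]) st.2 terms)

def printAssignment_alt (n : Int) : List String :=
  let st := (PySem.List.pyRange 0 n 1).foldl (altStep n)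
    ([], List.replicate n.toNat [])
  st.1 ++ st.2.map (fun c => "\n" ++ String.join c ++ " = 1")

-- ===== PRECONDITION & SPEC =====
def Spec_printAssignment (n : Int) (out : List String) : Prop := out = printAssignment_alt n
instance (n : Int) (out : List String) : Decidable (Spec_printAssignment n out) := by unfold Spec_printAssignment; infer_instance

-- ===== CLAIM (what is proved, stated in full; the proofs are below) =====
def Claim_equal_printAssignment : Prop := ∀ (n : Int), Dom_printAssignment n → Spec_printAssignment n (printAssignment n)

-- ===== LEMMAS AND PROOFS =====

theorem foldl_str_append (l : List String) (a b : String) :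
    l.foldl (fun r s => r ++ s) (a ++ b) = a ++ l.foldl (fun r s => r ++ s) b := by
  induction l generalizing b with
  | nil => simp
  | cons x t ih =>
    simp only [List.foldl_cons]
    rw [String.append_assoc]
    exact ih (b ++ x)

-- A's inner accumulator loop is the join of the mapped terms.
theorem foldl_append_eq_join {A : Type} (l : List A) (f : A → String) (init : String) :
    l.foldl (fun a x => a ++ " + " ++ f x) init
      = init ++ String.join (l.map (fun x => " + " ++ f x)) := by
  induction l generalizing init with
  | nil => simp [String.join]
  | cons a t ih =>
    simp only [List.foldl_cons, List.map_cons, String.join, List.foldl, ih]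
    rw [show ("" ++ (" + " ++ f a)) = (" + " ++ f a) ++ "" by simp, foldl_str_append]
    simp [String.append_assoc]

-- absorbing one appended term into the accumulated column lists
theorem zip_absorb (cols : List (List String)) (xs : List Int)
    (g : Int → String) (h : Int → List String) :
    List.zipWith (fun c l => c ++ l)
        (List.zipWith (fun c t => c ++ [t]) cols (xs.map g)) (xs.map h)
      = List.zipWith (fun c l => c ++ l) cols (xs.map (fun i => g i :: h i)) := by
  induction cols generalizing xs with
  | nil => simp
  | cons c cs ih =>
    cases xs with
    | nil => simp
    | cons x t => simp [ih]

-- invariant of B's sweep: rows are streamed out, cols collect the column term lists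
theorem altStep_foldl (n : Int) (ks : List Int) (out : List String)
    (cols : List (List String))
    (hlen : cols.length = (PySem.List.pyRange 0 n 1).length) :
    ks.foldl (altStep n) (out, cols)
      = (out ++ ks.map (fun k => "\n" ++ String.join
            ((PySem.List.pyRange 0 n 1).map (fun i => " + " ++ pyName "x" k i)) ++ " = 1"),
         List.zipWith (fun c l => c ++ l) cols
           ((PySem.List.pyRange 0 n 1).map (fun i =>
              ks.map (fun k => " + " ++ pyName "x" k i)))) := by
  induction ks generalizing out cols with
  | nil =>
    simp only [List.foldl_nil, List.map_nil, List.append_nil]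
    congr 1
    apply List.ext_getElem
    · simp [hlen]
    · intro i h1 h2
      simp
  | cons k ks ih =>
    rw [List.foldl_cons, altStep, ih]
    · congr 1
      · simp
      · rw [zip_absorb]
        simp
    · simp [hlen]

theorem printAssignment_eq (n : Int) : printAssignment n = printAssignment_alt n := by
  simp only [printAssignment, printAssignment_alt,
    PySem.List.foldl_append_singleton_eq_map, List.nil_append]
  rw [altStep_foldl n _ [] _ (by simp [PySem.List.length_pyRange_one])]
  simp only [List.nil_append]
  congr 1
  · apply List.map_congr_left
    intro k _
    rw [foldl_append_eq_join]
    simp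
  · rw [show (List.replicate n.toNat ([] : List String))
        = (PySem.List.pyRange 0 n 1).map (fun _ => []) by
      rw [List.map_const']
      simp [PySem.List.length_pyRange_one]]
    rw [List.zipWith_map, List.zipWith_self]
    simp only [List.map_map]
    apply List.map_congr_left
    intro i _
    rw [foldl_append_eq_join]
    simp [Function.comp]

-- ===== VERDICT (by name: the statement is the Claim_ definition above) =====
theorem printAssignment_spec : Claim_equal_printAssignment := by
  intro n _
  exact printAssignment_eq n
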